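-- pv_equiv track=rewrite | github.com/danraven/highest_product | highest_product.py | highest_product
-- ===== SOURCE A (Python) =====
-- import math
-- from typing import List
--
-- def smallest_index(l: List[int]) -> int:
--     i_min = 0
--     for i, val in enumerate(l[1:]):
--         if (val < l[i_min]):
--             i_min = i + 1
--     return i_min
--
-- def highest_product(nums: List[int], size: int=3) -> int:
--     # Sanity checks: numbers to check cannot be lower than 2, and the list cannot be smaller than the numbers required
--     if size < 2:
--         raise ValueError("Size must be at least 2")
--     if len(nums) < size:
--         raise ValueError("List of numbers must be at least the given size (%d)" % size)
--     # If the list is exactly the size, its elements yield the highest product by default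
--     if len(nums) == size:
--         return math.prod(nums)
--     largest = nums[:size]
--     min_index = smallest_index(largest)
--     for n in nums[size:]:
--         if n <= largest[min_index]:
--             continue
--         largest[min_index] = n
--         min_index = smallest_index(largest)
--     return math.prod(largest)
-- ===== SOURCE B (Python) =====
-- import math
--
--
-- def highest_product(nums, size=3):
--     if size < 2:
--         raise ValueError("Size must be at least 2")
--     if len(nums) < size:
--         raise ValueError("List of numbers must be at least the given size (%d)" % size)
--     return math.prod(sorted(nums, reverse=True)[:size])
-- ===== Notes on version B (the rewrite author's own statement) =====
-- stated objective: simpler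
-- what changed: Replaces A's size-window selection loop with its repeated min-index re-scans by a single descending sort followed by taking the product of the first `size` elements (product is commutative, so the multiset of the `size` largest values determines the result).
import Mathlib
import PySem

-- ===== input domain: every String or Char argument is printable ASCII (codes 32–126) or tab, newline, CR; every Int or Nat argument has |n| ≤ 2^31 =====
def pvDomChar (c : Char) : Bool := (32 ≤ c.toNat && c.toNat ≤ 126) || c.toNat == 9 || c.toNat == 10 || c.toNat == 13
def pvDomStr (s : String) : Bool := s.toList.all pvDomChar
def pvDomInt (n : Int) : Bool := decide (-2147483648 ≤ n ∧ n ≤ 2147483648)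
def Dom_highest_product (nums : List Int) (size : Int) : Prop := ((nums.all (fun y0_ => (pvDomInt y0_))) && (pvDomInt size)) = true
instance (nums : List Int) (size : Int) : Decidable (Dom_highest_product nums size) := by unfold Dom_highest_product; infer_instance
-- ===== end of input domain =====

-- B replaces A's size-window selection loop (with repeated min-index re-scans) by one
-- descending sort and the product of its first `size` elements (objective: simpler).

-- ===== PORT A =====
-- l[i_min] in A is always in range (i_min starts at 0 on a nonempty list and only moves to
-- enumerated indices), so the total pyGetD form is exact here.
def si_step (l : List Int) (i_min : Int) (p : Int × Int) : Int :=
  if p.2 < PySem.List.pyGetD l i_min 0 then p.1 + 1 else i_min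

def smallest_index (l : List Int) : Int :=
  (PySem.List.enumerate (PySem.List.slice l (some 1) none)).foldl (si_step l) 0

-- the body of A's `for n in nums[size:]` loop; min_index is always a valid index of largest,
-- so pyGetD/pySetD (the total forms) are exact.
def hp_step (st : List Int × Int) (n : Int) : List Int × Int :=
  if n ≤ PySem.List.pyGetD st.1 st.2 0 then st
  else (PySem.List.pySetD st.1 st.2 n, smallest_index (PySem.List.pySetD st.1 st.2 n))

def highest_product (nums : List Int) (size : Int) : Int :=
  if size < 2 then 0  -- Python raises ValueError here: excluded by Pre_
  else if (nums.length : Int) < size then 0  -- Python raises ValueError here: excluded by Pre_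
  else if (nums.length : Int) = size then nums.foldl (· * ·) 1  -- math.prod(nums)
  else
    (((PySem.List.slice nums (some size) none).foldl hp_step
        (PySem.List.slice nums none (some size),
         smallest_index (PySem.List.slice nums none (some size)))).1).foldl (· * ·) 1

-- ===== PORT B =====
def highest_product_alt (nums : List Int) (size : Int) : Int :=
  if size < 2 then 0  -- Python raises ValueError here: excluded by Pre_
  else if (nums.length : Int) < size then 0  -- Python raises ValueError here: excluded by Pre_
  else (PySem.List.slice (PySem.List.sorted nums (fun x => x) true) none (some size)).foldl (· * ·) 1

-- ===== PRECONDITION & SPEC =====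
-- Pre_: exactly the inputs on which A returns normally (A raises ValueError iff size < 2 or len(nums) < size).
def Pre_highest_product (nums : List Int) (size : Int) : Prop :=
  2 ≤ size ∧ size ≤ (nums.length : Int)
instance (nums : List Int) (size : Int) : Decidable (Pre_highest_product nums size) := by
  unfold Pre_highest_product; infer_instance

def pvWitness_highest_product : List Int × Int := ([3, 1, 2], 2)

def Spec_highest_product (nums : List Int) (size : Int) (out : Int) : Prop := out = highest_product_alt nums size
instance (nums : List Int) (size : Int) (out : Int) : Decidable (Spec_highest_product nums size out) := by
  unfold Spec_highest_product; infer_instance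

-- ===== CLAIM (what is proved, stated in full; the proofs are below) =====
def Claim_equal_highest_product : Prop := ∀ (nums : List Int) (size : Int), Dom_highest_product nums size → Pre_highest_product nums size → Spec_highest_product nums size (highest_product nums size)

-- ===== LEMMAS AND PROOFS =====

-- Proof-side machinery: descending insertion sort, whose take-k prefix tracks A's window.
def insD (n : Int) : List Int → List Int
  | [] => [n]
  | x :: xs => if x < n then n :: x :: xs else x :: insD n xs

def sortD (l : List Int) : List Int := l.foldl (fun acc x => insD x acc) []

lemma length_insD (n : Int) (L : List Int) : (insD n L).length = L.length + 1 := by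
  induction L with
  | nil => simp [insD]
  | cons x xs ih => simp only [insD]; split <;> simp [ih]

lemma insD_perm (n : Int) (L : List Int) : (insD n L).Perm (n :: L) := by
  induction L with
  | nil => simp [insD]
  | cons x xs ih =>
    simp only [insD]; split
    · exact List.Perm.refl _
    · exact (ih.cons x).trans (List.Perm.swap n x xs)

lemma mem_insD {y n : Int} {L : List Int} : y ∈ insD n L ↔ y = n ∨ y ∈ L := by
  rw [(insD_perm n L).mem_iff]; simp

lemma insD_pairwise {n : Int} {L : List Int} (h : L.Pairwise (fun a b : Int => b ≤ a)) :
    (insD n L).Pairwise (fun a b : Int => b ≤ a) := by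
  induction L with
  | nil => simp [insD]
  | cons x xs ih =>
    rcases List.pairwise_cons.mp h with ⟨hx, hxs⟩
    simp only [insD]; split
    · rename_i hlt
      refine List.pairwise_cons.mpr ⟨?_, h⟩
      intro y hy
      rcases List.mem_cons.mp hy with rfl | hy
      · exact le_of_lt hlt
      · exact le_trans (hx y hy) (le_of_lt hlt)
    · rename_i hge
      refine List.pairwise_cons.mpr ⟨?_, ih hxs⟩
      intro y hy
      rcases mem_insD.mp hy with rfl | hy
      · exact le_of_not_gt hge
      · exact hx y hy

lemma insD_eq_append {n : Int} {L : List Int} (h : ∀ x ∈ L, n ≤ x) : insD n L = L ++ [n] := by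
  induction L with
  | nil => simp [insD]
  | cons x xs ih =>
    simp only [insD]
    rw [if_neg (not_lt.mpr (h x (List.mem_cons_self)))]
    simp [ih (fun y hy => h y (List.mem_cons_of_mem x hy))]

lemma foldl_insD_perm (l : List Int) : ∀ acc : List Int,
    (l.foldl (fun a x => insD x a) acc).Perm (l ++ acc) := by
  induction l with
  | nil => intro acc; simp
  | cons x l ih =>
    intro acc
    simp only [List.foldl_cons, List.cons_append]
    exact ((ih (insD x acc)).trans
      ((insD_perm x acc).append_left l)).trans List.perm_middle

lemma sortD_perm (l : List Int) : (sortD l).Perm l := by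
  simpa [sortD] using foldl_insD_perm l []

lemma foldl_insD_pairwise (l : List Int) : ∀ acc : List Int,
    acc.Pairwise (fun a b : Int => b ≤ a) →
    (l.foldl (fun a x => insD x a) acc).Pairwise (fun a b : Int => b ≤ a) := by
  induction l with
  | nil => intro acc h; simpa using h
  | cons x l ih => intro acc h; exact ih _ (insD_pairwise h)

lemma sortD_pairwise (l : List Int) : (sortD l).Pairwise (fun a b : Int => b ≤ a) :=
  foldl_insD_pairwise l [] (by simp)

lemma sortD_eq_of {L l : List Int} (h1 : L.Perm l)
    (h2 : L.Pairwise (fun a b : Int => b ≤ a)) : sortD l = L := by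
  exact ((sortD_perm l).trans h1.symm).eq_of_pairwise
    (fun a b _ _ hab hba => le_antisymm hba hab) (sortD_pairwise l) h2

lemma sortD_length (l : List Int) : (sortD l).length = l.length :=
  (sortD_perm l).length_eq

lemma getLast_le {W : List Int} (h : W.Pairwise (fun a b : Int => b ≤ a)) (hW : W ≠ []) :
    ∀ y ∈ W, W.getLast hW ≤ y := by
  induction W with
  | nil => exact absurd rfl hW
  | cons x xs ih =>
    rcases List.pairwise_cons.mp h with ⟨hx, hxs⟩
    intro y hy
    cases xs with
    | nil => simp at hy; simp [hy]
    | cons z zs =>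
      rw [List.getLast_cons (by simp)]
      rcases List.mem_cons.mp hy with rfl | hy
      · exact hx _ (List.getLast_mem _)
      · exact ih hxs (by simp) y hy

lemma take_insD_take (L : List Int) : ∀ (k : Nat) (n : Int),
    (insD n (L.take k)).take k = (insD n L).take k := by
  induction L with
  | nil => intro k n; simp
  | cons x xs ih =>
    intro k n
    cases k with
    | zero => simp
    | succ j =>
      simp only [List.take_succ_cons, insD]
      split
      · cases j with
        | zero => simp
        | succ i => simp [List.take_take, List.take_succ_cons]
      · simp [ih j n]

lemma fold_take (rest : List Int) : ∀ (S : List Int) (k : Nat),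
    rest.foldl (fun S n => (insD n S).take k) (S.take k) = (rest.foldl (fun S n => insD n S) S).take k := by
  induction rest with
  | nil => intro S k; simp
  | cons n rest ih =>
    intro S k
    simp only [List.foldl_cons]
    rw [take_insD_take S k n, ih (insD n S) k]

-- smallest_index returns a valid index of a first minimum
lemma si_aux (l : List Int) : ∀ (t : List Int) (j : Nat) (i_min : Int),
    l.drop j = t → 1 ≤ j → 0 ≤ i_min → i_min.toNat < l.length →
    (∀ y ∈ l.take j, PySem.List.pyGetD l i_min 0 ≤ y) →
    (0 ≤ (PySem.List.enumerate t ((j : Int) - 1)).foldl (si_step l) i_min ∧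
     ((PySem.List.enumerate t ((j : Int) - 1)).foldl (si_step l) i_min).toNat < l.length ∧
     (∀ y ∈ l, PySem.List.pyGetD l ((PySem.List.enumerate t ((j : Int) - 1)).foldl (si_step l) i_min) 0 ≤ y)) := by
  intro t
  induction t with
  | nil =>
    intro j i_min hdrop hj h0 hlt hmin
    have hlen : l.length ≤ j := List.drop_eq_nil_iff.mp hdrop
    refine ⟨h0, hlt, ?_⟩
    intro y hy
    exact hmin y (by rwa [List.take_of_length_le hlen])
  | cons x t ih =>
    intro j i_min hdrop hj h0 hlt hmin
    have hjlen : j < l.length := by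
      by_contra hc
      rw [List.drop_eq_nil_iff.mpr (by omega)] at hdrop
      exact absurd hdrop (by simp)
    have hx : l[j] = x := by
      have h1 : (l.drop j)[0]'(by rw [hdrop]; simp) = x := by simp [hdrop]
      simpa using h1
    have hdrop' : l.drop (j + 1) = t := by
      rw [← List.drop_drop, hdrop]; rfl
    have hcons : PySem.List.enumerate (x :: t) ((j : Int) - 1)
        = ((j : Int) - 1, x) :: PySem.List.enumerate t ((j : Int) - 1 + 1) := rfl
    rw [hcons, List.foldl_cons]
    have hstart : ((j : Int) - 1 + 1) = ((j + 1 : Nat) : Int) - 1 := by push_cast; ring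
    rw [hstart]
    have hgj : PySem.List.pyGetD l (j : Int) 0 = l[j] := by
      have := PySem.List.pyGetD_eq_getElem l 0 (i := (j : Int)) (by positivity) (by exact_mod_cast hjlen)
      simpa using this
    by_cases hc : x < PySem.List.pyGetD l i_min 0
    · have hstep : si_step l i_min ((j : Int) - 1, x) = (j : Int) := by
        simp only [si_step, hc, if_true]; ring
      rw [hstep]
      refine ih (j + 1) (j : Int) hdrop' (by omega) (by positivity) (by simpa using hjlen) ?_
      intro y hy
      rw [List.take_succ_eq_append_getElem hjlen] at hy
      rw [hgj, hx]
      rcases List.mem_append.mp hy with hy | hy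
      · exact le_trans (le_of_lt hc) (hmin y hy)
      · rw [hx] at hy; simp at hy; omega
    · have hstep : si_step l i_min ((j : Int) - 1, x) = i_min := by
        simp [si_step, hc]
      rw [hstep]
      refine ih (j + 1) i_min hdrop' (by omega) h0 hlt ?_
      intro y hy
      rw [List.take_succ_eq_append_getElem hjlen] at hy
      rcases List.mem_append.mp hy with hy | hy
      · exact hmin y hy
      · have : y = x := by rw [hx] at hy; simpa using hy
        rw [this]; exact le_of_not_gt hc

lemma si_spec (l : List Int) (hl : l ≠ []) :
    0 ≤ smallest_index l ∧ (smallest_index l).toNat < l.length ∧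
    (∀ y ∈ l, PySem.List.pyGetD l (smallest_index l) 0 ≤ y) := by
  have hslice : PySem.List.slice l (some 1) none = l.drop 1 := by
    have := PySem.List.slice_from_natCast (xs := l) (a := 1)
    simpa using this
  have hmin1 : ∀ y ∈ l.take 1, PySem.List.pyGetD l (0 : Int) 0 ≤ y := by
    cases l with
    | nil => simp
    | cons x xs =>
      intro y hy
      have : y = x := by simpa using hy
      rw [this, PySem.List.pyGetD_zero_cons]
  have := si_aux l (l.drop 1) 1 0 rfl le_rfl le_rfl
    (by simpa using List.length_pos_iff.mpr hl) hmin1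
  unfold smallest_index
  rw [hslice, show (0 : Int) = ((1 : Nat) : Int) - 1 by norm_num]
  exact this

lemma loop_aux (k : Nat) (hk : 1 ≤ k) : ∀ (rest largest : List Int) (mi : Int),
    largest.length = k → 0 ≤ mi → mi.toNat < largest.length →
    (∀ y ∈ largest, PySem.List.pyGetD largest mi 0 ≤ y) →
    ((((rest.foldl hp_step (largest, mi)).1 : List Int) : Multiset Int)
      = ((rest.foldl (fun S n => (insD n S).take k) (sortD largest) : List Int) : Multiset Int)) := by
  intro rest
  induction rest with
  | nil =>
    intro largest mi hlen h0 hlt hmin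
    simpa using (Multiset.coe_eq_coe.mpr (sortD_perm largest)).symm
  | cons n rest ih =>
    intro largest mi hlen h0 hlt hmin
    simp only [List.foldl_cons]
    have hmi : mi < (largest.length : Int) := by omega
    have hSperm := sortD_perm largest
    have hSlen : (sortD largest).length = k := by rw [sortD_length, hlen]
    have hgm : PySem.List.pyGetD largest mi 0 = largest[mi.toNat] :=
      PySem.List.pyGetD_eq_getElem largest 0 h0 hmi
    have hmem_m : PySem.List.pyGetD largest mi 0 ∈ largest := by
      rw [hgm]; exact List.getElem_mem hlt
    by_cases hn : n ≤ PySem.List.pyGetD largest mi 0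
    · have hstep : hp_step (largest, mi) n = (largest, mi) := by
        simp [hp_step, hn]
      have htop : (insD n (sortD largest)).take k = sortD largest := by
        rw [insD_eq_append (fun x hx => le_trans hn (hmin x (hSperm.mem_iff.mp hx)))]
        rw [← hSlen]; exact List.take_left
      rw [hstep, htop]
      exact ih largest mi hlen h0 hlt hmin
    · push Not at hn
      have hstep : hp_step (largest, mi) n
          = (PySem.List.pySetD largest mi n, smallest_index (PySem.List.pySetD largest mi n)) := by
        simp [hp_step, not_le.mpr hn]
      have hset : PySem.List.pySetD largest mi n = largest.set mi.toNat n :=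
        PySem.List.pySetD_of_nonneg (xs := largest) (v := n) h0
      have hlen' : (PySem.List.pySetD largest mi n).length = k := by
        rw [hset, List.length_set, hlen]
      have hne' : PySem.List.pySetD largest mi n ≠ [] :=
        List.ne_nil_of_length_pos (by omega)
      obtain ⟨s0, s1, s2⟩ := si_spec _ hne'
      -- the new window, sorted, is exactly the take-k of the insertion into the old sorted window
      have hWpair : (insD n (sortD largest)).Pairwise (fun a b : Int => b ≤ a) :=
        insD_pairwise (sortD_pairwise largest)
      have hWlen : (insD n (sortD largest)).length = k + 1 := by
        rw [length_insD, hSlen]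
      have hWne : insD n (sortD largest) ≠ [] := List.ne_nil_of_length_pos (by omega)
      have hlast : (insD n (sortD largest)).getLast hWne = PySem.List.pyGetD largest mi 0 := by
        apply le_antisymm
        · exact getLast_le hWpair hWne _ (mem_insD.mpr (Or.inr (hSperm.mem_iff.mpr hmem_m)))
        · rcases mem_insD.mp (List.getLast_mem hWne) with hEq | hS
          · rw [hEq]; exact le_of_lt hn
          · exact hmin _ (hSperm.mem_iff.mp hS)
      have htake : (insD n (sortD largest)).take k = (insD n (sortD largest)).dropLast := by
        rw [List.dropLast_eq_take, hWlen]; norm_num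
      have hWsplit : (insD n (sortD largest)).dropLast ++ [PySem.List.pyGetD largest mi 0]
          = insD n (sortD largest) := by
        rw [← hlast]; exact List.dropLast_concat_getLast hWne
      have hperm : ((insD n (sortD largest)).take k).Perm (PySem.List.pySetD largest mi n) := by
        rw [htake, ← Multiset.coe_eq_coe]
        have c1 : ((insD n (sortD largest)).dropLast : Multiset Int)
            + {PySem.List.pyGetD largest mi 0} = n ::ₘ (largest : Multiset Int) := by
          rw [← Multiset.coe_singleton, Multiset.coe_add, hWsplit, Multiset.cons_coe]
          exact Multiset.coe_eq_coe.mpr ((insD_perm n (sortD largest)).trans (hSperm.cons n))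
        have c2 : ((PySem.List.pySetD largest mi n : List Int) : Multiset Int)
            + {PySem.List.pyGetD largest mi 0} = n ::ₘ (largest : Multiset Int) := by
          rw [hset, List.set_eq_take_cons_drop n hlt, hgm]
          conv_rhs => rw [show largest = largest.take mi.toNat ++ largest[mi.toNat] :: largest.drop (mi.toNat + 1) by
            rw [← List.set_eq_take_cons_drop _ hlt, List.set_getElem_self]]
          simp only [← Multiset.cons_coe, ← Multiset.coe_add, ← Multiset.singleton_add]
          abel
        exact Multiset.add_left_inj.mp (c1.trans c2.symm)
      have hkey : sortD (PySem.List.pySetD largest mi n) = (insD n (sortD largest)).take k :=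
        sortD_eq_of hperm (hWpair.sublist (List.take_sublist k _))
      rw [hstep]
      rw [ih _ _ hlen' s0 s1 s2, hkey]

-- ===== VERDICT (by name: the statement is the Claim_ definition above) =====
lemma foldl_mul_eq_prod (l : List Int) : l.foldl (· * ·) 1 = l.prod :=
  (List.prod_eq_foldl).symm

lemma sortD_eq_sorted (nums : List Int) :
    sortD nums = PySem.List.sorted nums (fun x => x) true := by
  apply sortD_eq_of (PySem.List.sorted_perm nums (fun x => x) true)
  have := PySem.List.sorted_pairwise_rev (xs := nums) (key := fun x => x)
  simpa using this

theorem highest_product_spec : Claim_equal_highest_product := by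
  intro nums size _ hpre
  obtain ⟨h2, hle⟩ := hpre
  unfold Spec_highest_product
  have hsz : size = ((size.toNat : Nat) : Int) := (Int.toNat_of_nonneg (by omega)).symm
  set k := size.toNat with hk
  have hk2 : 2 ≤ k := by omega
  have hkle : k ≤ nums.length := by omega
  have hBslice : PySem.List.slice (PySem.List.sorted nums (fun x => x) true) none (some size)
      = (PySem.List.sorted nums (fun x => x) true).take k := by
    rw [hsz]; exact PySem.List.slice_to_natCast _ _
  have hsortlen : (PySem.List.sorted nums (fun x => x) true).length = nums.length :=
    (PySem.List.sorted_perm nums (fun x => x) true).length_eq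
  have g1 : ¬ (size < 2) := by omega
  have g2 : ¬ ((nums.length : Int) < size) := by omega
  by_cases hEq : (nums.length : Int) = size
  · simp only [highest_product, highest_product_alt, if_neg g1, if_neg g2, if_pos hEq]
    rw [hBslice]
    have hkl : k = nums.length := by omega
    rw [List.take_of_length_le (by omega), foldl_mul_eq_prod, foldl_mul_eq_prod]
    exact ((PySem.List.sorted_perm nums (fun x => x) true).prod_eq).symm
  · simp only [highest_product, highest_product_alt, if_neg g1, if_neg g2, if_neg hEq]
    rw [hBslice]
    have hAslice1 : PySem.List.slice nums none (some size) = nums.take k := by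
      rw [hsz]; exact PySem.List.slice_to_natCast _ _
    have hAslice2 : PySem.List.slice nums (some size) none = nums.drop k := by
      rw [hsz]; exact PySem.List.slice_from_natCast _ _
    rw [hAslice1, hAslice2]
    have hlen0 : (nums.take k).length = k := by
      rw [List.length_take]; omega
    have hne0 : nums.take k ≠ [] := List.ne_nil_of_length_pos (by omega)
    obtain ⟨s0, s1, s2⟩ := si_spec _ hne0
    have hloop := loop_aux k (by omega) (nums.drop k) (nums.take k)
      (smallest_index (nums.take k)) hlen0 s0 s1 s2
    have hbase : sortD (nums.take k) = (sortD (nums.take k)).take k :=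
      (List.take_of_length_le (l := sortD (nums.take k)) (i := k)
        (by rw [sortD_length, hlen0])).symm
    have hfold : (nums.drop k).foldl (fun S n => (insD n S).take k) (sortD (nums.take k))
        = ((nums.drop k).foldl (fun S n => insD n S) (sortD (nums.take k))).take k := by
      conv_lhs => rw [hbase]
      exact fold_take (nums.drop k) (sortD (nums.take k)) k
    have hall : (nums.drop k).foldl (fun S n => insD n S) (sortD (nums.take k)) = sortD nums := by
      show (nums.drop k).foldl (fun S n => insD n S) ((nums.take k).foldl (fun acc x => insD x acc) []) = sortD nums
      rw [← List.foldl_append, List.take_append_drop]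
      rfl
    rw [hfold, hall, sortD_eq_sorted] at hloop
    rw [foldl_mul_eq_prod, foldl_mul_eq_prod]
    exact (Multiset.coe_eq_coe.mp hloop).prod_eq
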